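-- pv_equiv track=rewrite | github.com/so686so/MkTool | Extensions/search_tree.py | get_tmp_depth_list
-- ===== SOURCE A (Python) =====
-- def get_tmp_depth_list(depthList:list, curDepth:int) -> list:
--     res = []
--     dList = depthList.copy()
--     isFinish = False
--
--     for eachDepth in dList:
--         res.append(eachDepth)
--         if eachDepth == curDepth:
--             if isFinish:
--                 break
--             else:
--                 isFinish = True
--
--     return res
-- ===== SOURCE B (Python) =====
-- def get_tmp_depth_list(depthList: list, curDepth: int) -> list:
--     cnt = 0
--     for i, v in enumerate(depthList):
--         if v == curDepth:
--             cnt += 1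
--             if cnt == 2:
--                 return depthList[:i + 1]
--     return depthList[:]
-- ===== Notes on version B (the rewrite author's own statement) =====
-- stated objective: simpler
-- what changed: B computes the cut index of the second occurrence with an index/counter scan and returns a slice, instead of appending every element into an accumulator with a boolean finish flag.
import Mathlib
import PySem

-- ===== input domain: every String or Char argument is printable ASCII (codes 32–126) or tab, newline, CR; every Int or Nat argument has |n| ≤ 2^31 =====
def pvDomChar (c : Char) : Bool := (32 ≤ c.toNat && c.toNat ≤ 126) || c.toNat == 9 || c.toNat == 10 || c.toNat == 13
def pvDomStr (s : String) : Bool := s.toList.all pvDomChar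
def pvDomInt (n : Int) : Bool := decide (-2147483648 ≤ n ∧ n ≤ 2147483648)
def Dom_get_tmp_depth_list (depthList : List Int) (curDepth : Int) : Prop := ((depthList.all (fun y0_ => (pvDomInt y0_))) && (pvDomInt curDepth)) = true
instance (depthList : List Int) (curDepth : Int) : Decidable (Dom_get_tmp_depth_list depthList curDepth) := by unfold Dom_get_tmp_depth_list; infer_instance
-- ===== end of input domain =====

-- B replaces A's element-by-element accumulator and boolean finish flag with an
-- index/counter scan that finds the cut point and returns a slice (objective: simpler).

-- ===== PORT A =====
-- the for-loop over dList with the accumulator `res` and flag `isFinish`; `break` = stop recursion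
def pvAGo (cur : Int) : List Int → Bool → List Int
  | [], _ => []
  | x :: xs, fin =>
      x :: (if x == cur then (if fin then [] else pvAGo cur xs true) else pvAGo cur xs fin)

def get_tmp_depth_list (depthList : List Int) (curDepth : Int) : List Int :=
  pvAGo curDepth depthList false

-- ===== PORT B =====
-- the enumerate loop: absolute index i, counter cnt; returns the cut index on the second match
def pvBFind (cur : Int) : List Int → Nat → Nat → Option Nat
  | [], _, _ => none
  | v :: rest, i, cnt =>
      if v == cur then
        (if cnt + 1 == 2 then some i else pvBFind cur rest (i + 1) (cnt + 1))
      else pvBFind cur rest (i + 1) cnt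

def get_tmp_depth_list_alt (depthList : List Int) (curDepth : Int) : List Int :=
  match pvBFind curDepth depthList 0 0 with
  | some i => depthList.take (i + 1)   -- depthList[:i+1]
  | none => depthList                  -- depthList[:]

-- ===== PRECONDITION & SPEC =====
def Spec_get_tmp_depth_list (depthList : List Int) (curDepth : Int) (out : List Int) : Prop := out = get_tmp_depth_list_alt depthList curDepth
instance (depthList : List Int) (curDepth : Int) (out : List Int) : Decidable (Spec_get_tmp_depth_list depthList curDepth out) := by unfold Spec_get_tmp_depth_list; infer_instance

-- ===== CLAIM (what is proved, stated in full; the proofs are below) =====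
def Claim_equal_get_tmp_depth_list : Prop := ∀ (depthList : List Int) (curDepth : Int), Dom_get_tmp_depth_list depthList curDepth → Spec_get_tmp_depth_list depthList curDepth (get_tmp_depth_list depthList curDepth)

-- ===== LEMMAS AND PROOFS =====

theorem pvBFind_shift (cur : Int) (xs : List Int) (i cnt : Nat) :
    pvBFind cur xs i cnt = (pvBFind cur xs 0 cnt).map (· + i) := by
  induction xs generalizing i cnt with
  | nil => simp [pvBFind]
  | cons x rest ih =>
      simp only [pvBFind]
      by_cases hx : x == cur
      · by_cases hc : cnt + 1 == 2
        · simp [hx, hc]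
        · simp only [hx, hc, if_true, if_false, Bool.false_eq_true]
          rw [ih (i + 1), ih 1]
          cases pvBFind cur rest 0 (cnt + 1) <;> simp <;> omega
      · simp only [hx, Bool.false_eq_true, if_false]
        rw [ih (i + 1), ih 1]
        cases pvBFind cur rest 0 cnt <;> simp <;> omega

theorem pvMain (cur : Int) (xs : List Int) (fin : Bool) :
    pvAGo cur xs fin =
      match pvBFind cur xs 0 (if fin then 1 else 0) with
      | some j => xs.take (j + 1)
      | none => xs := by
  induction xs generalizing fin with
  | nil => cases fin <;> simp [pvAGo, pvBFind]
  | cons x rest ih =>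
      simp only [pvAGo, pvBFind]
      by_cases hx : x == cur
      · cases fin with
        | true => simp [hx]
        | false =>
            simp only [hx, if_true, if_false, Bool.false_eq_true]
            rw [pvBFind_shift]
            have h1 : (0 + 1 == 2) = false := by decide
            simp only [h1, Bool.false_eq_true, if_false]
            rw [ih true]
            cases h : pvBFind cur rest 0 1 <;> simp [h, List.take_succ_cons]
      · simp only [hx, Bool.false_eq_true, if_false]
        rw [pvBFind_shift, ih fin]
        cases h : pvBFind cur rest 0 (if fin then 1 else 0) <;> simp [h, List.take_succ_cons]

-- ===== VERDICT (by name: the statement is the Claim_ definition above) =====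
theorem get_tmp_depth_list_spec : Claim_equal_get_tmp_depth_list := by
  intro depthList curDepth _
  unfold Spec_get_tmp_depth_list get_tmp_depth_list get_tmp_depth_list_alt
  exact pvMain curDepth depthList false
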